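-- pv_equiv track=rewrite | github.com/JonasVanhulst/AdventOfCode | 2016/day1/Day_1.py | partTwo
-- ===== SOURCE A (Python) =====
-- def partTwo(content: str) -> int:
--     directions = [(0, 1), (1, 0), (0, -1), (-1, 0)]  # North, East, South, West
--     current_direction = 0
--     x, y = 0, 0
--     visited = set([(0, 0)])
--     for instruction in content.split(", "):
--         turn = instruction[0]
--         steps = int(instruction[1:])
--         if turn == "L":
--             current_direction = (current_direction - 1) % 4
--         elif turn == "R":
--             current_direction = (current_direction + 1) % 4
--         dx, dy = directions[current_direction]
--         for _ in range(steps):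
--             x += dx
--             y += dy
--             if (x, y) in visited:
--                 return abs(x) + abs(y)
--             visited.add((x, y))
--     return -1
-- ===== SOURCE B (Python) =====
-- def partTwo(content: str) -> int:
--     # Pipeline: parse the walk into the full list of visited points, group the
--     # indices of each point once, then take the earliest second visit.
--     dx, dy = 0, 1  # heading as a unit vector (North); rotate instead of a table
--     x, y = 0, 0
--     path = [(0, 0)]
--     for instr in content.split(", "):
--         turn = instr[0]
--         n = int(instr[1:])
--         if turn == "L":
--             dx, dy = -dy, dx
--         elif turn == "R":
--             dx, dy = dy, -dx
--         pts = [(x + dx * k, y + dy * k) for k in range(1, n + 1)]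
--         path += pts
--         if pts:
--             x, y = pts[-1]
--     seen = {}
--     for i, p in enumerate(path):
--         seen[p] = seen.get(p, []) + [i]
--     best = min((ixs[1] for ixs in seen.values() if len(ixs) > 1), default=None)
--     if best is None:
--         return -1
--     bx, by = path[best]
--     return abs(bx) + abs(by)
-- ===== Notes on version B (the rewrite author's own statement) =====
-- stated objective: alternative
-- what changed: A walks step by step keeping a hash set of visited points and returns inside the loop on the first revisit; B is a pipeline that first builds the whole point path (heading kept as a rotated unit vector instead of a direction table), then groups the indices of every point in one dict of index lists and returns the smallest second-occurrence index.
-- outside the precondition, e.g. on partTwo('R2, L2, L2, L2, X'): A returns 0, B raises ValueError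
import Mathlib
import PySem

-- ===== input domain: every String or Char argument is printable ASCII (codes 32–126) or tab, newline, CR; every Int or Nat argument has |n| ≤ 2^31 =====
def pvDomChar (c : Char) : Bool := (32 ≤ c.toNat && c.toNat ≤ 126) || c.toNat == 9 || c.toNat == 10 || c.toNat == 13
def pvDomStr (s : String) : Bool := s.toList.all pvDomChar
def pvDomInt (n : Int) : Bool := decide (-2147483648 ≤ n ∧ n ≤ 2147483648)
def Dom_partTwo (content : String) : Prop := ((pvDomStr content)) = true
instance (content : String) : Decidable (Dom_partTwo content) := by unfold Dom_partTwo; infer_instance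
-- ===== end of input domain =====

-- B re-structures A's online walk (set of visited points, early return) as a pipeline:
-- build the whole point path, group the indices of every point once, return the smallest
-- second-visit index; same value as A on every input Pre_ admits ("alternative", not faster).

-- ===== PORT A =====
-- A: walk step by step, keep a set of visited points, return on the first revisit.
def dirsA : List (Int × Int) := [(0, 1), (1, 0), (0, -1), (-1, 0)]

-- 'for _ in range(steps)' (empty for steps ≤ 0, hence the .toNat at the call site)
def stepLoopA : Nat → Int → Int → Int → Int → PySem.Set (Int × Int) →
    Sum Int (Int × Int × PySem.Set (Int × Int))
  | 0, _, _, x, y, vis => .inr (x, y, vis)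
  | n + 1, dx, dy, x, y, vis =>
    let x' := x + dx
    let y' := y + dy
    if PySem.Set.contains vis (x', y') then .inl (|x'| + |y'|)
    else stepLoopA n dx dy x' y' (PySem.Set.add vis (x', y'))

def mainLoopA : List String → Int → Int → Int → PySem.Set (Int × Int) → Int
  | [], _, _, _, _ => -1
  | instr :: rest, d, x, y, vis =>
    match PySem.Str.pyGet? instr 0 with
    | none => 0  -- IndexError (empty instruction); excluded by Pre_
    | some turn =>
      match PySem.Int.ofStr? (PySem.Str.slice instr (some 1) none) with
      | none => 0  -- ValueError from int(); excluded by Pre_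
      | some steps =>
        let d' := if turn = 'L' then PySem.Int.mod (d - 1) 4
                  else if turn = 'R' then PySem.Int.mod (d + 1) 4 else d
        let v := PySem.List.pyGetD dirsA d' (0, 0)
        match stepLoopA steps.toNat v.1 v.2 x y vis with
        | .inl r => r
        | .inr (x', y', vis') => mainLoopA rest d' x' y' vis'

def partTwo (content : String) : Int :=
  -- content.split(", "): separator nonempty, so split? is always `some`
  mainLoopA ((PySem.Str.split? content ", ").getD []) 0 0 0
    (PySem.Set.ofList [((0 : Int), (0 : Int))])

-- ===== PORT B =====
-- B: heading kept as a unit vector rotated in place (no table), the whole path built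
-- first, then points grouped by a dict of index lists and the least second index taken.
def rotB (turn : Char) (dx dy : Int) : Int × Int :=
  if turn = 'L' then (-dy, dx) else if turn = 'R' then (dy, -dx) else (dx, dy)

-- [(x + dx*k, y + dy*k) for k in range(1, n + 1)]
def segB (dx dy x y n : Int) : List (Int × Int) :=
  (PySem.List.pyRange 1 (n + 1)).map (fun k => (x + dx * k, y + dy * k))

def buildB : List String → Int → Int → Int → Int → List (Int × Int) → List (Int × Int)
  | [], _, _, _, _, path => path
  | instr :: rest, dx, dy, x, y, path =>
    match PySem.Str.pyGet? instr 0, PySem.Int.ofStr? (PySem.Str.slice instr (some 1) none) with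
    | some turn, some n =>
      let v := rotB turn dx dy
      let pts := segB v.1 v.2 x y n
      let last := pts.getLastD (x, y)  -- 'if pts: x, y = pts[-1]'
      buildB rest v.1 v.2 last.1 last.2 (path ++ pts)
    | _, _ => path  -- Source B raises here (IndexError/ValueError); excluded by Pre_

-- seen[p] = seen.get(p, []) + [i] over enumerate(path)
def groupB (path : List (Int × Int)) : PySem.Dict (Int × Int) (List Int) :=
  (PySem.List.enumerate path).foldl
    (fun d ip => d.modify ip.2 [] (fun l => l ++ [ip.1])) PySem.Dict.empty

def partTwo_alt (content : String) : Int :=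
  let path := buildB ((PySem.Str.split? content ", ").getD []) 0 1 0 0 [(0, 0)]
  let seen := groupB path
  let cands := seen.values.filterMap
    (fun ixs => if 1 < ixs.length then some (PySem.List.pyGetD ixs 1 0) else none)
  match PySem.List.min? cands (fun j => j) with
  | none => -1
  | some b =>
    let p := PySem.List.pyGetD path b (0, 0)
    |p.1| + |p.2|

-- ===== PRECONDITION & SPEC =====
-- Pre_ excludes inputs where some comma-separated instruction is empty or its tail is not a
-- Python int literal: A raises there (IndexError/ValueError) unless an earlier revisit makes
-- it return first, while B, which parses the whole input before walking, always raises there.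
def Pre_partTwo (content : String) : Prop :=
  ∀ instr ∈ (PySem.Str.split? content ", ").getD [],
    instr ≠ "" ∧ (PySem.Int.ofStr? (PySem.Str.slice instr (some 1) none)).isSome
instance (content : String) : Decidable (Pre_partTwo content) := by
  unfold Pre_partTwo; infer_instance

def pvWitness_partTwo : String := "R8, R4, R4, R8"

def Spec_partTwo (content : String) (out : Int) : Prop := out = partTwo_alt content
instance (content : String) (out : Int) : Decidable (Spec_partTwo content out) := by
  unfold Spec_partTwo; infer_instance

-- ===== CLAIM (what is proved, stated in full; the proofs are below) =====
def Claim_equal_partTwo : Prop :=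
  ∀ (content : String), Dom_partTwo content → Pre_partTwo content →
    Spec_partTwo content (partTwo content)

-- ===== LEMMAS AND PROOFS =====

-- first point of the stream that already occurs in the prefix before it
def fdP : List (Int × Int) → List (Int × Int) → Option (Int × Int)
  | _, [] => none
  | pfx, p :: rest => if p ∈ pfx then some p else fdP (pfx ++ [p]) rest

def ansP : Option (Int × Int) → Int
  | some p => |p.1| + |p.2|
  | none => -1

-- the points of one straight segment, recursively
def segN : Nat → Int → Int → Int → Int → List (Int × Int)
  | 0, _, _, _, _ => []
  | n + 1, dx, dy, x, y => (x + dx, y + dy) :: segN n dx dy (x + dx) (y + dy)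

def castL (l : List Nat) : List Int := l.map (fun j => Int.ofNat j)

-- indices at which path carries the point p
def occN (path : List (Int × Int)) (p : Int × Int) : List Nat :=
  (List.range path.length).filter (fun j => path.getD j (0, 0) == p)

-- indices of revisits, ascending
def Jlist (path : List (Int × Int)) : List Nat :=
  (List.range path.length).filter (fun i => decide (path.getD i (0, 0) ∈ path.take i))

lemma segB_pyRange (dx dy : Int) : ∀ (m : Nat) (c x y : Int),
    (PySem.List.pyRange c (c + m)).map (fun k => (x + dx * k, y + dy * k)) =
      segN m dx dy (x + dx * (c - 1)) (y + dy * (c - 1)) := by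
  intro m
  induction m with
  | zero => intro c x y; simp [segN]
  | succ n ih =>
    intro c x y
    rw [PySem.List.pyRange_one_cons (by omega)]
    push_cast
    rw [List.map_cons]
    have h2 : (c : Int) + (n + 1) = (c + 1) + n := by ring
    rw [h2, ih (c + 1) x y]
    show _ = segN (n + 1) dx dy _ _
    simp only [segN]
    have e1 : x + dx * c = x + dx * (c - 1) + dx := by ring
    have e2 : y + dy * c = y + dy * (c - 1) + dy := by ring
    have e3 : x + dx * (c + 1 - 1) = x + dx * (c - 1) + dx := by ring
    have e4 : y + dy * (c + 1 - 1) = y + dy * (c - 1) + dy := by ring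
    rw [e1, e2, e3, e4]

lemma segB_eq (dx dy x y n : Int) : segB dx dy x y n = segN n.toNat dx dy x y := by
  unfold segB
  by_cases h : n ≤ 0
  · have he : PySem.List.pyRange 1 (n + 1) = [] := by
      rw [PySem.List.pyRange_of_pos 1 (n + 1) (by norm_num)]
      have hnb : ¬ ((1 : Int) < n + 1) := by omega
      simp [hnb]
    have ht : n.toNat = 0 := by omega
    rw [he, ht]
    rfl
  · have h1 : n + 1 = (1 : Int) + n.toNat := by omega
    rw [h1, segB_pyRange]
    have e1 : x + dx * ((1 : Int) - 1) = x := by ring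
    have e2 : y + dy * ((1 : Int) - 1) = y := by ring
    rw [e1, e2]

lemma fdP_append (l1 l2 : List (Int × Int)) : ∀ pfx,
    fdP pfx (l1 ++ l2) =
      match fdP pfx l1 with
      | some p => some p
      | none => fdP (pfx ++ l1) l2 := by
  induction l1 with
  | nil => intro pfx; simp [fdP]
  | cons p rest ih =>
    intro pfx
    by_cases hp : p ∈ pfx
    · simp [fdP, hp]
    · simp only [List.cons_append, fdP, if_neg hp, ih (pfx ++ [p]), List.append_assoc,
        List.nil_append]

lemma fdP_head (rest : List (Int × Int)) : ∀ pfx,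
    fdP pfx rest =
      (((List.range rest.length).filter
          (fun i => decide (rest.getD i (0, 0) ∈ pfx ++ rest.take i))).head?).map
        (fun i => rest.getD i (0, 0)) := by
  induction rest with
  | nil => intro pfx; simp [fdP]
  | cons p rest ih =>
    intro pfx
    rw [List.length_cons, List.range_succ_eq_map, List.filter_cons]
    by_cases hp : p ∈ pfx
    · simp [fdP, hp]
    · rw [if_neg (by simpa using hp)]
      simp only [fdP, if_neg hp, ih (pfx ++ [p])]
      rw [List.filter_map]
      have hpred : (fun i => decide ((p :: rest).getD i (0, 0) ∈ pfx ++ (p :: rest).take i)) ∘ Nat.succ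
          = (fun i => decide (rest.getD i (0, 0) ∈ (pfx ++ [p]) ++ rest.take i)) := by
        funext i
        simp [Function.comp, List.take_succ_cons, List.append_assoc]
      rw [hpred, List.head?_map, Option.map_map]
      rfl

lemma buildB_acc (instrs : List String) : ∀ dx dy x y path,
    buildB instrs dx dy x y path = path ++ buildB instrs dx dy x y [] := by
  induction instrs with
  | nil => intro dx dy x y path; simp [buildB]
  | cons instr rest ih =>
    intro dx dy x y path
    cases ht : PySem.Str.pyGet? instr 0 with
    | none => simp only [buildB]; rw [ht]; simp
    | some turn =>
      cases hs : PySem.Int.ofStr? (PySem.Str.slice instr (some 1) none) with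
      | none => simp only [buildB]; rw [ht, hs]; simp
      | some n =>
        simp only [buildB, ht, hs, List.nil_append]
        conv_lhs => rw [ih]
        conv_rhs => rw [ih]
        rw [List.append_assoc]

lemma stepA (dx dy : Int) : ∀ (n : Nat) (x y : Int) (vis : PySem.Set (Int × Int))
    (pfx : List (Int × Int)), (∀ q : Int × Int, q ∈ vis ↔ q ∈ pfx) →
    (∀ p, fdP pfx (segN n dx dy x y) = some p →
      stepLoopA n dx dy x y vis = .inl (|p.1| + |p.2|)) ∧
    (fdP pfx (segN n dx dy x y) = none →
      ∃ vis', stepLoopA n dx dy x y vis =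
          .inr (((segN n dx dy x y).getLastD (x, y)).1,
                ((segN n dx dy x y).getLastD (x, y)).2, vis') ∧
        (∀ q : Int × Int, q ∈ vis' ↔ q ∈ pfx ++ segN n dx dy x y)) := by
  intro n
  induction n with
  | zero =>
    intro x y vis pfx hvis
    refine ⟨fun p hp => by simp [fdP, segN] at hp, fun _ => ⟨vis, ?_, ?_⟩⟩
    · simp [stepLoopA, segN]
    · simpa [segN] using hvis
  | succ n ih =>
    intro x y vis pfx hvis
    by_cases hm : ((x + dx, y + dy) : Int × Int) ∈ pfx
    · have hc : PySem.Set.contains vis (x + dx, y + dy) = true :=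
        (PySem.Set.contains_iff vis _).mpr ((hvis _).mpr hm)
      constructor
      · intro p hp
        simp only [segN, fdP, if_pos hm, Option.some.injEq] at hp
        subst hp
        have hmemv := (hvis _).mpr hm
        simp [stepLoopA, hmemv]
      · intro hnone
        simp [segN, fdP, if_pos hm] at hnone
    · have hc : PySem.Set.contains vis (x + dx, y + dy) = false := by
        rw [← Bool.not_eq_true, PySem.Set.contains_iff]
        exact fun h => hm ((hvis _).mp h)
      have hvis' : ∀ q : Int × Int,
          q ∈ PySem.Set.add vis (x + dx, y + dy) ↔ q ∈ pfx ++ [(x + dx, y + dy)] := by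
        intro q
        rw [PySem.Set.mem_add]
        simp [hvis q]
      obtain ⟨ih1, ih2⟩ := ih (x + dx) (y + dy) (PySem.Set.add vis (x + dx, y + dy))
        (pfx ++ [(x + dx, y + dy)]) hvis'
      constructor
      · intro p hp
        simp only [segN, fdP, if_neg hm] at hp
        simp only [stepLoopA, hc, Bool.false_eq_true, if_false]
        exact ih1 p hp
      · intro hnone
        simp only [segN, fdP, if_neg hm] at hnone
        obtain ⟨vis', heq, hmem⟩ := ih2 hnone
        refine ⟨vis', ?_, ?_⟩
        · have hseg : segN (n + 1) dx dy x y
              = (x + dx, y + dy) :: segN n dx dy (x + dx) (y + dy) := rfl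
          rw [hseg, List.getLastD_cons]
          simp only [stepLoopA, hc, Bool.false_eq_true, if_false]
          exact heq
        · intro q
          rw [hmem q]
          simp [segN, List.append_assoc]

lemma rotTable (d : Int) (hd : d = 0 ∨ d = 1 ∨ d = 2 ∨ d = 3) (turn : Char) :
    ((if turn = 'L' then PySem.Int.mod (d - 1) 4
      else if turn = 'R' then PySem.Int.mod (d + 1) 4 else d) = 0 ∨
     (if turn = 'L' then PySem.Int.mod (d - 1) 4
      else if turn = 'R' then PySem.Int.mod (d + 1) 4 else d) = 1 ∨
     (if turn = 'L' then PySem.Int.mod (d - 1) 4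
      else if turn = 'R' then PySem.Int.mod (d + 1) 4 else d) = 2 ∨
     (if turn = 'L' then PySem.Int.mod (d - 1) 4
      else if turn = 'R' then PySem.Int.mod (d + 1) 4 else d) = 3) ∧
    PySem.List.pyGetD dirsA
        (if turn = 'L' then PySem.Int.mod (d - 1) 4
         else if turn = 'R' then PySem.Int.mod (d + 1) 4 else d) (0, 0) =
      rotB turn (PySem.List.pyGetD dirsA d (0, 0)).1 (PySem.List.pyGetD dirsA d (0, 0)).2 := by
  rcases hd with h | h | h | h <;> subst h <;>
    by_cases hL : turn = 'L' <;> by_cases hR : turn = 'R' <;>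
    simp only [hL, hR, if_true, if_false, rotB] <;> decide

lemma mainA (instrs : List String) : ∀ (d x y : Int) (vis : PySem.Set (Int × Int))
    (pfx : List (Int × Int)), (d = 0 ∨ d = 1 ∨ d = 2 ∨ d = 3) →
    (∀ q : Int × Int, q ∈ vis ↔ q ∈ pfx) →
    (∀ instr ∈ instrs,
      instr ≠ "" ∧ (PySem.Int.ofStr? (PySem.Str.slice instr (some 1) none)).isSome) →
    mainLoopA instrs d x y vis =
      ansP (fdP pfx (buildB instrs (PySem.List.pyGetD dirsA d (0, 0)).1
        (PySem.List.pyGetD dirsA d (0, 0)).2 x y [])) := by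
  induction instrs with
  | nil => intro d x y vis pfx _ _ _; simp [mainLoopA, buildB, fdP, ansP]
  | cons instr rest ih =>
    intro d x y vis pfx hd hvis hok
    obtain ⟨hne, hint⟩ := hok instr (by simp)
    obtain ⟨turn, hturn⟩ : ∃ c, PySem.Str.pyGet? instr 0 = some c := by
      have h : instr.toList ≠ [] := by simpa using hne
      have hg : PySem.Str.pyGet? instr 0 = instr.toList[0]? := by
        have := PySem.Str.pyGet?_natCast instr 0
        simpa using this
      rcases hc : instr.toList with _ | ⟨c, cs⟩
      · exact absurd hc h
      · exact ⟨c, by rw [hg, hc]; rfl⟩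
    obtain ⟨steps, hsteps⟩ : ∃ k, PySem.Int.ofStr? (PySem.Str.slice instr (some 1) none) = some k :=
      Option.isSome_iff_exists.mp hint
    obtain ⟨hd', hrot⟩ := rotTable d hd turn
    simp only [mainLoopA, hturn, hsteps]
    simp only [buildB, hturn, hsteps]
    set v := PySem.List.pyGetD dirsA d (0, 0) with hv
    set d' := if turn = 'L' then PySem.Int.mod (d - 1) 4
              else if turn = 'R' then PySem.Int.mod (d + 1) 4 else d with hd'def
    set v' := rotB turn v.1 v.2 with hv'
    have hrot' : PySem.List.pyGetD dirsA d' (0, 0) = v' := hrot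
    set pts := segB v'.1 v'.2 x y steps with hpts
    have hptsN : pts = segN steps.toNat v'.1 v'.2 x y := segB_eq _ _ _ _ _
    obtain ⟨s1, s2⟩ := stepA v'.1 v'.2 steps.toNat x y vis pfx hvis
    rw [hrot']
    rw [buildB_acc rest]
    rw [fdP_append]
    simp only [List.nil_append]
    cases hfd : fdP pfx (segN steps.toNat v'.1 v'.2 x y) with
    | some p =>
      rw [s1 p hfd]
      rw [← hptsN] at hfd
      rw [hfd]
      simp [ansP]
    | none =>
      obtain ⟨vis', heq, hmem⟩ := s2 hfd
      rw [← hptsN] at hfd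
      rw [hfd, heq]
      have hlast : pts.getLastD (x, y) = (segN steps.toNat v'.1 v'.2 x y).getLastD (x, y) := by
        rw [hptsN]
      rw [← hptsN] at hmem
      have := ih d' ((pts.getLastD (x, y)).1) ((pts.getLastD (x, y)).2) vis' (pfx ++ pts) hd'
        (by simpa using hmem) (fun i hi => hok i (by simp [hi]))
      rw [hrot'] at this
      rw [hlast] at this ⊢
      exact this

lemma enum_snd (xs : List (Int × Int)) :
    (PySem.List.enumerate xs).map (fun ip => ip.2) = xs := by
  rw [PySem.List.enumerate_eq_map_pyRange xs (0, 0), List.map_map]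
  exact PySem.List.map_pyGetD_pyRange_zero xs (0, 0)

lemma keys_groupB (path : List (Int × Int)) :
    (groupB path).keys = PySem.Set.ofList path := by
  unfold groupB
  rw [PySem.Dict.keys_foldl_modify_key (PySem.List.enumerate path) (fun ip => ip.2) []
    (fun _ ip => fun l => l ++ [ip.1]) PySem.Dict.empty]
  rw [enum_snd]
  simp [PySem.Set.update_nil_left]

lemma nodup_keys_groupB (path : List (Int × Int)) : (groupB path).keys.Nodup := by
  unfold groupB
  exact PySem.Dict.nodup_keys_foldl_modify_key _ _ _ _ _ PySem.Dict.nodup_keys_empty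

lemma getD_groupB (path : List (Int × Int)) (p : Int × Int) :
    (groupB path).getD p [] = castL (occN path p) := by
  unfold castL
  unfold groupB
  rw [show (PySem.List.enumerate path) =
      ((PySem.List.enumerate path).map (fun ip => (ip.2, ip.1))).map (fun q => (q.2, q.1)) by
    rw [List.map_map]
    exact (List.map_id _).symm]
  rw [List.foldl_map]
  rw [PySem.Dict.getD_foldl_modify_append
    (((PySem.List.enumerate path).map (fun ip => (ip.2, ip.1)))) PySem.Dict.empty p]
  rw [PySem.List.enumerate_eq_map_pyRange path (0, 0)]
  have hlen : PySem.List.pyRange 0 (PySem.List.len path)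
      = (List.range path.length).map (fun k : Nat => (k : Int)) := by
    rw [PySem.List.len_eq]
    exact PySem.List.pyRange_zero_natCast path.length
  rw [hlen]
  unfold occN
  simp only [List.map_map, List.filter_map]
  simp only [PySem.Dict.getD_empty, List.nil_append]
  have hf : List.filter (((fun q => q.1 == p) ∘ (fun ip => (ip.2, ip.1)) ∘
        (fun j => (j, PySem.List.pyGetD path j (0, 0))) ∘ fun k : Nat => (k : Int)))
        (List.range path.length) =
      List.filter (fun j => path.getD j (0, 0) == p) (List.range path.length) :=
    List.filter_congr (fun j hj => by simp [Function.comp])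
  rw [hf]
  generalize (List.filter (fun j => path.getD j (0, 0) == p) (List.range path.length)) = l
  induction l with
  | nil => rfl
  | cons a l ih => simp

lemma values_groupB (path : List (Int × Int)) :
    (groupB path).values =
      (PySem.Set.ofList path).map (fun p => castL (occN path p)) := by
  rw [PySem.Dict.values_eq_map_keys (groupB path) (nodup_keys_groupB path) [],
    keys_groupB path]
  exact List.map_congr_left (fun p _ => getD_groupB path p)

lemma mem_occN (path : List (Int × Int)) (p : Int × Int) (j : Nat) :
    j ∈ occN path p ↔ j < path.length ∧ path.getD j (0, 0) = p := by
  simp [occN, List.mem_filter, List.mem_range]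

lemma pairwise_occN (path : List (Int × Int)) (p : Int × Int) :
    (occN path p).Pairwise (· < ·) :=
  (List.pairwise_lt_range).sublist List.filter_sublist

lemma mem_Jlist (path : List (Int × Int)) (i : Nat) :
    i ∈ Jlist path ↔ i < path.length ∧ path.getD i (0, 0) ∈ path.take i := by
  simp [Jlist, List.mem_filter, List.mem_range]

lemma pairwise_Jlist (path : List (Int × Int)) : (Jlist path).Pairwise (· < ·) :=
  (List.pairwise_lt_range).sublist List.filter_sublist

lemma head_min_Jlist (path : List (Int × Int)) (i₀ : Nat)
    (h : (Jlist path).head? = some i₀) : i₀ ∈ Jlist path ∧ ∀ i ∈ Jlist path, i₀ ≤ i := by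
  have hp := pairwise_Jlist path
  rcases hl : Jlist path with _ | ⟨a, t⟩
  · simp [hl] at h
  · rw [hl] at h hp
    simp at h
    subst h
    rw [List.pairwise_cons] at hp
    refine ⟨by simp, ?_⟩
    intro i hi
    rcases List.mem_cons.mp hi with rfl | hi
    · exact le_refl _
    · exact le_of_lt (hp.1 i hi)

lemma getD_mem_take (path : List (Int × Int)) (j i : Nat) (hj : j < i) (hlen : j < path.length) :
    path.getD j (0, 0) ∈ path.take i := by
  have h1 : j < (path.take i).length := by simp [List.length_take]; omega
  have h2 : (path.take i)[j] = path[j] := List.getElem_take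
  have h3 : path.getD j (0, 0) = (path.take i)[j] := by
    rw [h2, List.getD_eq_getElem]
  rw [h3]
  exact List.getElem_mem h1

lemma mem_take_getD (path : List (Int × Int)) (i : Nat) (p : Int × Int)
    (h : p ∈ path.take i) : ∃ j, j < i ∧ j < path.length ∧ path.getD j (0, 0) = p := by
  obtain ⟨j, hj, hget⟩ := List.getElem_of_mem h
  have hj' : j < i ∧ j < path.length := by
    have := hj; simp [List.length_take] at this; omega
  refine ⟨j, hj'.1, hj'.2, ?_⟩
  rw [List.getD_eq_getElem _ _ hj'.2]
  rw [← hget]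
  exact (List.getElem_take).symm

-- any candidate (second occurrence of some point) is a revisit index
lemma cand_mem_Jlist (path : List (Int × Int)) (p : Int × Int)
    (hlen : 1 < (occN path p).length) : (occN path p)[1] ∈ Jlist path := by
  have hpw := pairwise_occN path p
  have h0 : (occN path p)[0] ∈ occN path p := List.getElem_mem (by omega)
  have h1 : (occN path p)[1] ∈ occN path p := List.getElem_mem hlen
  have hlt : (occN path p)[0] < (occN path p)[1] :=
    (List.pairwise_iff_getElem.mp hpw) 0 1 (by omega) hlen (by omega)
  obtain ⟨hl0, hg0⟩ := (mem_occN path p _).mp h0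
  obtain ⟨hl1, hg1⟩ := (mem_occN path p _).mp h1
  rw [mem_Jlist]
  refine ⟨hl1, ?_⟩
  have hin := getD_mem_take path _ _ hlt hl0
  rw [hg0] at hin
  rw [hg1]
  exact hin

-- the first revisit index is the second occurrence of its point
lemma head_Jlist_occ (path : List (Int × Int)) (i₀ : Nat)
    (h : (Jlist path).head? = some i₀) :
    1 < (occN path (path.getD i₀ (0, 0))).length ∧
      (occN path (path.getD i₀ (0, 0)))[1]? = some i₀ := by
  obtain ⟨hmem, hmin⟩ := head_min_Jlist path i₀ h
  obtain ⟨hl0, hdup⟩ := (mem_Jlist path i₀).mp hmem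
  set p₀ := path.getD i₀ (0, 0) with hp₀
  obtain ⟨a, hai, halen, ha⟩ := mem_take_getD path i₀ p₀ hdup
  have hpw := pairwise_occN path p₀
  have hmono := List.pairwise_iff_getElem.mp hpw
  have hal : a ∈ occN path p₀ := (mem_occN path p₀ a).mpr ⟨halen, ha⟩
  have hil : i₀ ∈ occN path p₀ := (mem_occN path p₀ i₀).mpr ⟨hl0, rfl⟩
  have huniq : ∀ j ∈ occN path p₀, j < i₀ → j = a := by
    intro j hj hji
    by_contra hne
    obtain ⟨hjlen, hgj⟩ := (mem_occN path p₀ j).mp hj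
    rcases Nat.lt_or_ge j a with hja | haj
    · have haJ : a ∈ Jlist path := by
        rw [mem_Jlist]
        exact ⟨halen, by rw [ha, ← hgj]; exact getD_mem_take path j a hja hjlen⟩
      have := hmin a haJ
      omega
    · have hja : j > a := by omega
      have hjJ : j ∈ Jlist path := by
        rw [mem_Jlist]
        exact ⟨hjlen, by rw [hgj, ← ha]; exact getD_mem_take path a j hja halen⟩
      have := hmin j hjJ
      omega
  obtain ⟨ka, hka, hgka⟩ := List.getElem_of_mem hal
  obtain ⟨ki, hki, hgki⟩ := List.getElem_of_mem hil
  have hane : a ≠ i₀ := by omega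
  have hkalt : ka < ki := by
    rcases Nat.lt_trichotomy ka ki with hh | hh | hh
    · exact hh
    · subst hh
      rw [hgka] at hgki
      omega
    · have := hmono ki ka hki hka hh
      omega
  have hka0 : ka = 0 := by
    by_contra hka0
    have h0lt : 0 < ka := by omega
    have hlt0 := hmono 0 ka (by omega) hka h0lt
    have hm : (occN path p₀)[0] ∈ occN path p₀ := List.getElem_mem (by omega)
    have := huniq (occN path p₀)[0] hm (by omega)
    omega
  subst hka0
  have hki1 : ki = 1 := by
    by_contra hki1
    have h1lt : 1 < ki := by omega
    have h1a : (occN path p₀)[0] < (occN path p₀)[1] := hmono 0 1 (by omega) (by omega) (by omega)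
    have h1i : (occN path p₀)[1] < (occN path p₀)[ki] := hmono 1 ki (by omega) hki h1lt
    have hm : (occN path p₀)[1] ∈ occN path p₀ := List.getElem_mem (by omega)
    have := huniq (occN path p₀)[1] hm (by omega)
    omega
  subst hki1
  exact ⟨hki, by rw [List.getElem?_eq_getElem hki, hgki]⟩

lemma cands_charact (path : List (Int × Int)) :
    (groupB path).values.filterMap
        (fun ixs => if 1 < ixs.length then some (PySem.List.pyGetD ixs 1 0) else none) =
      (PySem.Set.ofList path).filterMap
        (fun p => if 1 < (occN path p).length
          then ((occN path p)[1]?).map (fun j => Int.ofNat j) else none) := by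
  rw [values_groupB, List.filterMap_map]
  apply List.filterMap_congr
  intro p hp
  simp only [Function.comp_apply, castL, List.length_map]
  by_cases h : 1 < (occN path p).length
  · rw [if_pos h, if_pos h]
    have hg : PySem.List.pyGetD ((occN path p).map (fun j => Int.ofNat j)) 1 0 =
        ((occN path p).map (fun j => Int.ofNat j))[1]'(by simpa using h) := by
      have := PySem.List.pyGetD_ofNat ((occN path p).map (fun j => Int.ofNat j)) 1 0
        (by simpa using h)
      simpa using this
    rw [hg, List.getElem_map, List.getElem?_eq_getElem h]
    rfl
  · rw [if_neg h, if_neg h]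

lemma minJ (path : List (Int × Int)) :
    PySem.List.min? ((groupB path).values.filterMap
        (fun ixs => if 1 < ixs.length then some (PySem.List.pyGetD ixs 1 0) else none))
        (fun j => j) =
      (Jlist path).head?.map (fun i => Int.ofNat i) := by
  rw [cands_charact]
  set cands := (PySem.Set.ofList path).filterMap
    (fun p => if 1 < (occN path p).length
      then ((occN path p)[1]?).map (fun j => Int.ofNat j) else none) with hcands
  have hmem : ∀ c ∈ cands, ∃ j ∈ Jlist path, c = Int.ofNat j := by
    intro c hc
    rw [hcands, List.mem_filterMap] at hc
    obtain ⟨p, _, hp⟩ := hc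
    by_cases h : 1 < (occN path p).length
    · rw [if_pos h, List.getElem?_eq_getElem h] at hp
      refine ⟨(occN path p)[1], cand_mem_Jlist path p h, ?_⟩
      simp only [Option.map_some, Option.some_inj] at hp
      exact hp.symm
    · rw [if_neg h] at hp; exact absurd hp (by simp)
  cases hJ : (Jlist path).head? with
  | none =>
    rw [List.head?_eq_none_iff] at hJ
    have hnil : cands = [] := by
      rcases hc : cands with _ | ⟨c, t⟩
      · rfl
      · obtain ⟨j, hj, _⟩ := hmem c (by rw [hc]; simp)
        rw [hJ] at hj
        exact absurd hj (by simp)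
    rw [hnil]
    simp [PySem.List.min?_eq_none_iff]
  | some i₀ =>
    obtain ⟨hocc2, hocc1⟩ := head_Jlist_occ path i₀ hJ
    obtain ⟨hmemJ, hminJ⟩ := head_min_Jlist path i₀ hJ
    have hp₀mem : (path.getD i₀ (0, 0)) ∈ PySem.Set.ofList path := by
      rw [PySem.Set.mem_ofList]
      have hl : i₀ < path.length := ((mem_Jlist path i₀).mp hmemJ).1
      rw [List.getD_eq_getElem _ _ hl]
      exact List.getElem_mem hl
    have hc₀ : Int.ofNat i₀ ∈ cands := by
      rw [hcands, List.mem_filterMap]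
      exact ⟨path.getD i₀ (0, 0), hp₀mem, by rw [if_pos hocc2, hocc1]; rfl⟩
    cases hm : PySem.List.min? cands (fun j => j) with
    | none =>
      rw [PySem.List.min?_eq_none_iff] at hm
      rw [hm] at hc₀
      exact absurd hc₀ (by simp)
    | some m =>
      have h1 : m ≤ Int.ofNat i₀ := PySem.List.min?_isMin hm _ hc₀
      obtain ⟨j, hj, rfl⟩ := hmem m (PySem.List.min?_mem hm)
      have h2 : i₀ ≤ j := hminJ j hj
      have h3 : (Int.ofNat j) = Int.ofNat i₀ := by
        simp only [Int.ofNat_eq_natCast] at h1 ⊢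
        omega
      rw [h3]
      rfl

lemma altB (path : List (Int × Int)) :
    (match PySem.List.min? ((groupB path).values.filterMap
        (fun ixs => if 1 < ixs.length then some (PySem.List.pyGetD ixs 1 0) else none))
        (fun j => j) with
      | none => (-1 : Int)
      | some b =>
        |(PySem.List.pyGetD path b (0, 0)).1| + |(PySem.List.pyGetD path b (0, 0)).2|) =
      ansP (fdP [] path) := by
  rw [minJ]
  rw [fdP_head path []]
  have hfil : (List.range path.length).filter
      (fun i => decide (path.getD i (0, 0) ∈ [] ++ path.take i)) = Jlist path := by
    unfold Jlist
    apply List.filter_congr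
    intro i _
    simp
  rw [hfil]
  cases hJ : (Jlist path).head? with
  | none => rfl
  | some i₀ =>
    simp only [Option.map_some]
    have hg : PySem.List.pyGetD path (Int.ofNat i₀) (0, 0) = path.getD i₀ (0, 0) := by
      simp
    rw [hg]
    rfl

-- ===== VERDICT (by name: the statement is the Claim_ definition above) =====
theorem partTwo_spec : Claim_equal_partTwo := by
  intro content _ hpre
  unfold Spec_partTwo partTwo partTwo_alt
  set instrs := (PySem.Str.split? content ", ").getD [] with hinstrs
  have hok : ∀ instr ∈ instrs,
      instr ≠ "" ∧ (PySem.Int.ofStr? (PySem.Str.slice instr (some 1) none)).isSome := hpre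
  have hvis0 : ∀ q : Int × Int,
      q ∈ PySem.Set.ofList [((0 : Int), (0 : Int))] ↔ q ∈ [((0 : Int), (0 : Int))] :=
    fun q => PySem.Set.mem_ofList _ q
  have hA := mainA instrs 0 0 0 (PySem.Set.ofList [((0 : Int), (0 : Int))])
    [((0 : Int), (0 : Int))] (Or.inl rfl) hvis0 hok
  have hdir : PySem.List.pyGetD dirsA (0 : Int) ((0 : Int), (0 : Int)) = ((0 : Int), (1 : Int)) := by
    decide
  rw [hdir] at hA
  rw [hA]
  rw [altB (buildB instrs 0 1 0 0 [(0, 0)])]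
  rw [buildB_acc instrs 0 1 0 0 [(0, 0)]]
  have hstep : fdP [] ([((0 : Int), (0 : Int))] ++ buildB instrs 0 1 0 0 []) =
      fdP [((0 : Int), (0 : Int))] (buildB instrs 0 1 0 0 []) := by
    simp [fdP]
  rw [hstep]
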